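-- pv_equiv track=rewrite | github.com/apple-open-source/macos | xnu/tools/lldbmacros/utils.py | GetLongestMatchOption
-- ===== SOURCE A (Python) =====
-- def GetLongestMatchOption(searchstr, options=[], ignore_case=True):
--     """ Get longest matched string from set of options.
--         params:
--             searchstr : string of chars to be matched
--             options : array of strings that are to be matched
--         returns:
--             [] - array of matched options. The order of options is same as the arguments.
--                  empty array is returned if searchstr does not match any option.
--         example:
--             subcommand = LongestMatch('Rel', ['decode', 'enable', 'reload'], ignore_case=True)
--             print subcommand # prints ['reload']
--     """
--     if ignore_case:
--         searchstr = searchstr.lower()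
--     found_options = []
--     for o in options:
--         so = o
--         if ignore_case:
--             so = o.lower()
--         if so == searchstr:
--             return [o]
--         if so.find(searchstr) >=0 :
--             found_options.append(o)
--     return found_options
-- ===== SOURCE B (Python) =====
-- def GetLongestMatchOption(searchstr, options=[], ignore_case=True):
--     needle = searchstr.lower() if ignore_case else searchstr
--     # pass 1: first exact (normalized) match wins
--     for o in options:
--         if (o.lower() if ignore_case else o) == needle:
--             return [o]
--     # pass 2: no exact match -> collect all substring matches, in order
--     return [o for o in options if needle in (o.lower() if ignore_case else o)]
-- ===== Notes on version B (the rewrite author's own statement) =====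
-- stated objective: simpler
-- what changed: Replaces A's single interleaved loop (append substring matches while watching for an exact match to early-return) by two separately-shaped passes: a find-first-exact-match scan, then a plain substring-filter comprehension; equivalent because an exact match is also a substring match.
import Mathlib
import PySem

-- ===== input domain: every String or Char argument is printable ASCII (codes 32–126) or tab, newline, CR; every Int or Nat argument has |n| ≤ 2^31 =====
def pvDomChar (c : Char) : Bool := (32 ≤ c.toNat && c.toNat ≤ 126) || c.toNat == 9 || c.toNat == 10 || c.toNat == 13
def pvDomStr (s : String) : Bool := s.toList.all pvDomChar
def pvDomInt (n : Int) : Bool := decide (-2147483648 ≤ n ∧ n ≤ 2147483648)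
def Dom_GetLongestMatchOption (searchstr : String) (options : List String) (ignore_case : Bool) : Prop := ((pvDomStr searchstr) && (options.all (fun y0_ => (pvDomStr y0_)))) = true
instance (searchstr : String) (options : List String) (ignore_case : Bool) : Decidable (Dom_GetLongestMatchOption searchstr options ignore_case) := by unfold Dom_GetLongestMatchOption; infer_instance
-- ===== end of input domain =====

-- B replaces A's single interleaved append-and-early-return loop by two separate passes
-- (find-first-exact-match, then a substring filter); objective: simpler decomposition.


-- ===== PORT A =====
-- A's loop: walk the options, normalizing each; early-return [o] on exact match,
-- otherwise append substring matches to the accumulator.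
def pvLoopA (s : String) (ic : Bool) (acc : List String) : List String → List String
  | [] => acc
  | o :: rest =>
    let so := if ic then PySem.Str.lower o else o
    if so = s then [o]
    else if 0 ≤ PySem.Str.find so s then pvLoopA s ic (acc ++ [o]) rest
    else pvLoopA s ic acc rest

def GetLongestMatchOption (searchstr : String) (options : List String) (ignore_case : Bool) : List String :=
  let s := if ignore_case then PySem.Str.lower searchstr else searchstr
  pvLoopA s ignore_case [] options

-- ===== PORT B =====
def GetLongestMatchOption_alt (searchstr : String) (options : List String) (ignore_case : Bool) : List String :=
  let needle := if ignore_case then PySem.Str.lower searchstr else searchstr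
  match options.find? (fun o => (if ignore_case then PySem.Str.lower o else o) == needle) with
  | some o => [o]
  | none => options.filter (fun o => PySem.Str.isIn needle (if ignore_case then PySem.Str.lower o else o))

-- ===== PRECONDITION & SPEC =====
def Spec_GetLongestMatchOption (searchstr : String) (options : List String) (ignore_case : Bool) (out : List String) : Prop := out = GetLongestMatchOption_alt searchstr options ignore_case
instance (searchstr : String) (options : List String) (ignore_case : Bool) (out : List String) : Decidable (Spec_GetLongestMatchOption searchstr options ignore_case out) := by unfold Spec_GetLongestMatchOption; infer_instance

-- ===== CLAIM (what is proved, stated in full; the proofs are below) =====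
def Claim_equal_GetLongestMatchOption : Prop := ∀ (searchstr : String) (options : List String) (ignore_case : Bool), Dom_GetLongestMatchOption searchstr options ignore_case → Spec_GetLongestMatchOption searchstr options ignore_case (GetLongestMatchOption searchstr options ignore_case)

-- ===== LEMMAS AND PROOFS =====

-- A's loop equals: first exact match if any, else accumulator ++ substring filter.
theorem pvLoopA_eq (s : String) (ic : Bool) :
    ∀ (opts : List String) (acc : List String),
      pvLoopA s ic acc opts =
        match opts.find? (fun o => (if ic then PySem.Str.lower o else o) == s) with
        | some o => [o]
        | none => acc ++ opts.filter (fun o => PySem.Str.isIn s (if ic then PySem.Str.lower o else o)) := by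
  intro opts
  induction opts with
  | nil => intro acc; simp [pvLoopA]
  | cons o rest ih =>
    intro acc
    by_cases h : (if ic then PySem.Str.lower o else o) = s
    · simp [pvLoopA, h, List.find?]
    · have hne : ((if ic then PySem.Str.lower o else o) == s) = false := by
        simp [h]
      by_cases hsub : 0 ≤ PySem.Str.find (if ic then PySem.Str.lower o else o) s
      · have hin : PySem.Str.isIn s (if ic then PySem.Str.lower o else o) = true := by
          have := (PySem.Str.find_nonneg_iff (s := (if ic then PySem.Str.lower o else o)) (sub := s)).mp hsub
          exact (PySem.Str.isIn_iff_infix _ _).mpr this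
        simp only [pvLoopA, h, if_pos hsub, List.find?, hne, List.filter, hin]
        rw [ih]
        cases rest.find? (fun o => (if ic then PySem.Str.lower o else o) == s) <;> simp
      · have hin : PySem.Str.isIn s (if ic then PySem.Str.lower o else o) = false := by
          by_contra hc
          have : PySem.Str.isIn s (if ic then PySem.Str.lower o else o) = true := by
            cases hx : PySem.Str.isIn s (if ic then PySem.Str.lower o else o) <;> simp_all
          exact hsub ((PySem.Str.find_nonneg_iff _ _).mpr ((PySem.Str.isIn_iff_infix _ _).mp this))
        simp only [pvLoopA, h, if_neg hsub, List.find?, hne, List.filter, hin]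
        exact ih acc

-- ===== VERDICT (by name: the statement is the Claim_ definition above) =====
theorem GetLongestMatchOption_spec : Claim_equal_GetLongestMatchOption := by
  intro searchstr options ignore_case _
  unfold Spec_GetLongestMatchOption GetLongestMatchOption GetLongestMatchOption_alt
  rw [pvLoopA_eq]
  simp
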